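-- pv_equiv track=rewrite | github.com/pypi-data/pypi-mirror-404 | packages/satellome/satellome-1.6.1-py3-none-any.whl/satellome/core_functions/tools/distances.py | hamming_sliding_distance
-- ===== SOURCE A (Python) =====
-- def hamming_sliding_distance(seq1, seq2, min_hd=None):
--     """
--     Compute minimum Hamming distance across all circular rotations of seq2.
--
--     Slides seq1 along doubled seq2 to find rotation with fewest mismatches.
--     Essential for comparing tandem repeat motifs where ACAT = TACA = ATAC = CATA
--     due to circular nature of repeat units.
--
--     Args:
--         seq1 (str): First sequence (fixed reference)
--         seq2 (str): Second sequence (rotated to find best match)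
--         min_hd (int, optional): Initial minimum to beat (for early stopping).
--                                If None, starts at len(seq1). Defaults to None.
--
--     Returns:
--         int: Minimum Hamming distance found across all rotations
--
--     Example:
--         >>> # Perfect match after rotation
--         >>> hamming_sliding_distance("ACAT", "TACA")
--         0
--         >>>
--         >>> # One mismatch in best alignment
--         >>> hamming_sliding_distance("ACAT", "TACG")
--         1
--         >>>
--         >>> # With early stopping hint
--         >>> hamming_sliding_distance("ACAT", "GGGG", min_hd=2)
--         2  # Stops early once confirmed >= 2
--
--     Note:
--         - Assumes len(seq1) == len(seq2) for correct behavior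
--         - Uses early stopping: breaks loop if current rotation exceeds min_hd
--         - Time complexity: O(n²) where n = len(seq1)
--         - Space complexity: O(n) due to seq2 doubling
--     """
--     seq2 = seq2 + seq2
--     if min_hd is None:
--         min_hd = len(seq1)
--     for i in range(len(seq2)-len(seq1)+1):
--         hd = 0
--         for j in range(len(seq1)):
--             if seq1[j] != seq2[i+j]:
--                 hd += 1
--                 if hd >= min_hd:
--                     break
--         if hd < min_hd:
--             min_hd = hd
--     return min_hd
-- ===== SOURCE B (Python) =====
-- def hamming_sliding_distance(seq1, seq2, min_hd=None):
--     # Match-counting cross-correlation: index the positions of each character in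
--     # the doubled seq2, accumulate per-offset match counts over the equal-character
--     # (j, p) pairs only, then min distance = len(seq1) - best match count.
--     # Same result as the sliding double loop.
--     s2 = seq2 + seq2
--     n1 = len(seq1)
--     best = n1 if min_hd is None else min_hd
--     offs = len(s2) - n1 + 1
--     if offs <= 0:
--         return best
--     pos = {}
--     for p, c in enumerate(s2):
--         pos.setdefault(c, []).append(p)
--     matches = [0] * offs
--     for j, c in enumerate(seq1):
--         for p in pos.get(c, []):
--             i = p - j
--             if 0 <= i < offs:
--                 matches[i] += 1
--     return min(best, n1 - max(matches))
-- ===== Notes on version B (the rewrite author's own statement) =====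
-- stated objective: alternative
-- what changed: Replaces the quadratic slide-and-compare double loop (char-by-char comparison at every offset, with early stopping) by a match-counting cross-correlation: index the positions of every character of the doubled seq2 once, accumulate per-offset match counts by visiting only the (j, p) pairs with equal characters, and return min(initial, len(seq1) - max(matches)).
import Mathlib
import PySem

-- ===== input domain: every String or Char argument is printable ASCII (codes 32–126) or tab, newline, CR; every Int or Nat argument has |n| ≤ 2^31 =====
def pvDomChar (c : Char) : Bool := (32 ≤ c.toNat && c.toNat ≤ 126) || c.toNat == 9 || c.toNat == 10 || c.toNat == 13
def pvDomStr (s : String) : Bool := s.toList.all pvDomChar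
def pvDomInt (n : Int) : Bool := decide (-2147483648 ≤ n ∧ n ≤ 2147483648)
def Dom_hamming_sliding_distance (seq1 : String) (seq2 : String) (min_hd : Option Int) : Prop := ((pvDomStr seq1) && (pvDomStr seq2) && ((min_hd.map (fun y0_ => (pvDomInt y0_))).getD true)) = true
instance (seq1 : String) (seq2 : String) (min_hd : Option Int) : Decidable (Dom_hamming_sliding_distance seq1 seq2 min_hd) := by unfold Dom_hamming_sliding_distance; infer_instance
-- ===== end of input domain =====

-- ===== PORT A =====
-- B replaces A's slide-and-compare double loop by a different algorithm: a per-character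
-- position index of the doubled seq2 with per-offset match counting; return values proved equal.

-- inner 'for j in range(len(seq1))' loop of A, with its early 'break'
def pvInnerA (l1 l2 : List Char) (i minhd : Int) : List Int → Int → Int
  | [], hd => hd
  | j :: js, hd =>
    if PySem.List.pyGet? l1 j ≠ PySem.List.pyGet? l2 (i + j) then
      if hd + 1 ≥ minhd then hd + 1
      else pvInnerA l1 l2 i minhd js (hd + 1)
    else pvInnerA l1 l2 i minhd js hd

-- outer 'for i in range(len(seq2)-len(seq1)+1)' loop of A
def pvOuterA (l1 l2 : List Char) : List Int → Int → Int
  | [], m => m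
  | i :: is, m =>
    let hd := pvInnerA l1 l2 i m (PySem.List.pyRange 0 (l1.length : Int) 1) 0
    pvOuterA l1 l2 is (if hd < m then hd else m)

def hamming_sliding_distance (seq1 : String) (seq2 : String) (min_hd : Option Int) : Int :=
  let l1 := seq1.toList
  let l2 := seq2.toList ++ seq2.toList          -- seq2 = seq2 + seq2
  let m0 : Int := match min_hd with
    | none => (l1.length : Int)                 -- if min_hd is None: min_hd = len(seq1)
    | some v => v
  pvOuterA l1 l2 (PySem.List.pyRange 0 ((l2.length : Int) - (l1.length : Int) + 1) 1) m0

-- ===== PORT B =====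
def hamming_sliding_distance_alt (seq1 : String) (seq2 : String) (min_hd : Option Int) : Int :=
  let l1 := seq1.toList
  let s2 := seq2.toList ++ seq2.toList          -- s2 = seq2 + seq2
  let n1 : Int := (l1.length : Int)
  let best : Int := match min_hd with
    | none => n1
    | some v => v
  let offs : Int := (s2.length : Int) - n1 + 1
  if offs ≤ 0 then best
  else
    -- pos = {}; for p, c in enumerate(s2): pos.setdefault(c, []).append(p)
    let pos := (PySem.List.enumerate s2).foldl
      (fun d pc => d.modify pc.2 [] (fun l => l ++ [pc.1])) PySem.Dict.empty
    -- matches = [0]*offs; for j, c in enumerate(seq1): for p in pos.get(c, []): ...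
    let mvec := (PySem.List.enumerate l1).foldl
      (fun ms jc =>
        (pos.getD jc.2 []).foldl
          (fun ms p =>
            if 0 ≤ p - jc.1 ∧ p - jc.1 < offs then
              PySem.List.pySetD ms (p - jc.1) (PySem.List.pyGetD ms (p - jc.1) 0 + 1)
            else ms)
          ms)
      (List.replicate offs.toNat 0)
    -- return min(best, n1 - max(matches))   (matches is nonempty here)
    min best (n1 - (PySem.List.max? mvec (fun x => x)).getD 0)

-- ===== PRECONDITION & SPEC =====
def Spec_hamming_sliding_distance (seq1 : String) (seq2 : String) (min_hd : Option Int) (out : Int) : Prop := out = hamming_sliding_distance_alt seq1 seq2 min_hd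
instance (seq1 : String) (seq2 : String) (min_hd : Option Int) (out : Int) : Decidable (Spec_hamming_sliding_distance seq1 seq2 min_hd out) := by unfold Spec_hamming_sliding_distance; infer_instance

-- ===== CLAIM (what is proved, stated in full; the proofs are below) =====
def Claim_equal_hamming_sliding_distance : Prop := ∀ (seq1 : String) (seq2 : String) (min_hd : Option Int), Dom_hamming_sliding_distance seq1 seq2 min_hd → Spec_hamming_sliding_distance seq1 seq2 min_hd (hamming_sliding_distance seq1 seq2 min_hd)

-- ===== LEMMAS AND PROOFS =====

-- ---- proof-side vocabulary ----

-- full mismatch count of row i, exactly as A's inner loop predicates read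
def pvMism (l1 l2 : List Char) (i : Int) (js : List Int) : Int :=
  (js.countP (fun j => decide (PySem.List.pyGet? l1 j ≠ PySem.List.pyGet? l2 (i + j))) : Int)

def pvFull (l1 l2 : List Char) (i : Int) : Int :=
  pvMism l1 l2 i (PySem.List.pyRange 0 (l1.length : Int) 1)

-- match count of row i (complement of pvFull)
def pvMatchRow (l1 l2 : List Char) (i : Int) : Int :=
  ((List.range l1.length).countP
    (fun (j : Nat) => PySem.List.pyGet? l2 (i + (j : Int)) == PySem.List.pyGet? l1 (j : Int)) : Int)

def pvUpd (ms : List Int) (i : Int) : List Int :=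
  PySem.List.pySetD ms i (PySem.List.pyGetD ms i 0 + 1)

-- ---- A-side characterisation ----

theorem pvInnerA_spec (l1 l2 : List Char) (i m : Int) : ∀ (js : List Int) (hd : Int),
    (hd + pvMism l1 l2 i js < m → pvInnerA l1 l2 i m js hd = hd + pvMism l1 l2 i js) ∧
    (m ≤ hd + pvMism l1 l2 i js → m ≤ pvInnerA l1 l2 i m js hd) := by
  intro js
  induction js with
  | nil => intro hd; simp [pvInnerA, pvMism]
  | cons j js ih =>
    intro hd
    have hM : (0:Int) ≤ pvMism l1 l2 i js := by
      simp [pvMism]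
    by_cases hj : PySem.List.pyGet? l1 j ≠ PySem.List.pyGet? l2 (i + j)
    · have hcnt : pvMism l1 l2 i (j :: js) = pvMism l1 l2 i js + 1 := by
        simp [pvMism, hj]
      rw [hcnt]
      constructor
      · intro hlt
        have hnb : ¬ (hd + 1 ≥ m) := by omega
        simp only [pvInnerA, if_pos hj, if_neg hnb]
        have := (ih (hd + 1)).1 (by omega)
        rw [this]; ring
      · intro hge
        simp only [pvInnerA, if_pos hj]
        by_cases hb : hd + 1 ≥ m
        · rw [if_pos hb]; omega
        · rw [if_neg hb]
          exact (ih (hd + 1)).2 (by omega)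
    · have hcnt : pvMism l1 l2 i (j :: js) = pvMism l1 l2 i js := by
        simp [pvMism, hj]
      rw [hcnt]
      simp only [pvInnerA, if_neg hj]
      exact ih hd

theorem pvOuterA_spec (l1 l2 : List Char) : ∀ (is : List Int) (m : Int),
    pvOuterA l1 l2 is m = is.foldl (fun m i => min m (pvFull l1 l2 i)) m := by
  intro is
  induction is with
  | nil => intro m; rfl
  | cons i is ih =>
    intro m
    have hspec := pvInnerA_spec l1 l2 i m (PySem.List.pyRange 0 (l1.length : Int) 1) 0
    have heq : pvMism l1 l2 i (PySem.List.pyRange 0 (l1.length : Int) 1) = pvFull l1 l2 i := rfl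
    rw [heq] at hspec
    simp only [zero_add] at hspec
    simp only [pvOuterA, List.foldl_cons]
    by_cases h : pvFull l1 l2 i < m
    · rw [hspec.1 h, if_pos h, ih, min_eq_right (le_of_lt h)]
    · have h2 : m ≤ pvInnerA l1 l2 i m (PySem.List.pyRange 0 (l1.length : Int) 1) 0 :=
        hspec.2 (by omega)
      rw [if_neg (by omega), ih, min_eq_left (by omega)]

-- ---- enumerate as a map over range ----

theorem pvEnum (xs : List Char) : ∀ s : Int,
    PySem.List.enumerate xs s
      = (List.range xs.length).map (fun (k : Nat) => ((k : Int) + s, xs.getD k default)) := by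
  induction xs with
  | nil => intro s; simp [PySem.List.enumerate_eq_zipIdx_map]
  | cons x xs ih =>
    intro s
    have h1 : PySem.List.enumerate (x :: xs) s = (s, x) :: PySem.List.enumerate xs (s + 1) := by
      simp [PySem.List.enumerate_eq_zipIdx_map, List.zipIdx_cons,
        List.zipIdx_succ (l := xs) (i := 0), List.map_map, Function.comp]
      intro a b _
      ring
    rw [h1, ih (s + 1)]
    have h2 : List.range (x :: xs).length = 0 :: (List.range xs.length).map (· + 1) := by
      simp [List.range_succ_eq_map]
    rw [h2, List.map_cons, List.map_map]
    congr 1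
    · simp
    · apply List.map_congr_left
      intro k _
      simp [Function.comp]
      ring

-- ---- B-side characterisation ----

theorem pvMism_complement (l1 l2 : List Char) (i : Int) :
    pvFull l1 l2 i = (l1.length : Int) - pvMatchRow l1 l2 i := by
  unfold pvFull pvMism pvMatchRow
  rw [PySem.List.pyRange_one]
  simp only [List.countP_map]
  have h1 : (((l1.length : Int)) - 0).toNat = l1.length := by omega
  rw [h1]
  set p := fun (j : Nat) => PySem.List.pyGet? l2 (i + (j : Int)) == PySem.List.pyGet? l1 (j : Int) with hp
  have h2 : List.countP
      ((fun j => decide (PySem.List.pyGet? l1 j ≠ PySem.List.pyGet? l2 (i + j))) ∘ (fun (k : Nat) => (0 : Int) + ↑k))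
      (List.range l1.length)
      = List.countP (fun (k : Nat) => decide ¬(p k = true)) (List.range l1.length) := by
    apply List.countP_congr
    intro k _
    simp only [Function.comp, hp, PySem.List.pyGet?_natCast, decide_eq_true_eq, ne_eq, zero_add]
    exact not_congr (by rw [beq_iff_eq, eq_comm])
  rw [h2]
  have hlen := List.length_eq_countP_add_countP p (l := List.range l1.length)
  rw [List.length_range] at hlen
  omega


theorem pvUpd_fold_length : ∀ (L : List Int) (ms : List Int),
    (L.foldl pvUpd ms).length = ms.length := by
  intro L
  induction L with
  | nil => intro ms; rfl
  | cons x L ih =>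
    intro ms
    rw [List.foldl_cons, ih, pvUpd, PySem.List.length_pySetD]

theorem pvUpd_getD (ms : List Int) (x k : Int) (hx : 0 ≤ x) (hk0 : 0 ≤ k)
    (hk : k < (ms.length : Int)) :
    PySem.List.pyGetD (pvUpd ms x) k 0
      = PySem.List.pyGetD ms k 0 + (if x = k then 1 else 0) := by
  by_cases hxr : x < (ms.length : Int)
  · have hxc : x = ((x.toNat : Nat) : Int) := by omega
    have hkc : k = ((k.toNat : Nat) : Int) := by omega
    rw [pvUpd, hxc, hkc, PySem.List.pyGetD_pySetD_natCast _ _ _ _ _ (by omega)]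
    by_cases h : k.toNat = x.toNat
    · rw [if_pos h, if_pos (by omega)]
      rw [h]
    · rw [if_neg h, if_neg (by omega)]
      ring
  · have hnone : PySem.List.pySet? ms x (PySem.List.pyGetD ms x 0 + 1) = none := by
      rw [PySem.List.pySet?_eq_none_iff]
      intro hin
      unfold PySem.Raise.InRange at hin
      omega
    have : pvUpd ms x = ms := by
      rw [pvUpd, PySem.List.pySetD, hnone]
      rfl
    rw [this, if_neg (by omega)]
    ring

theorem pvUpd_fold_getD (k : Int) (hk0 : 0 ≤ k) : ∀ (L : List Int) (ms : List Int),
    (∀ x ∈ L, 0 ≤ x) → k < (ms.length : Int) →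
    PySem.List.pyGetD (L.foldl pvUpd ms) k 0 = PySem.List.pyGetD ms k 0 + (L.count k : Int) := by
  intro L
  induction L with
  | nil => intro ms _ _; simp
  | cons x L ih =>
    intro ms hL hk
    rw [List.foldl_cons, ih (pvUpd ms x) (fun y hy => hL y (by simp [hy]))
      (by rw [pvUpd, PySem.List.length_pySetD]; exact hk),
      pvUpd_getD ms x k (hL x (by simp)) hk0 hk, List.count_cons]
    by_cases h : x = k
    · simp [h]
      ring
    · have hb : ¬ ((x == k) = true) := by simp [h]
      simp [h, hb]

theorem pvFold_min_const (g : Int → Int) : ∀ (l : List Int) (m : Int),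
    (∀ i ∈ l, m ≤ g i) → l.foldl (fun m i => min m (g i)) m = m := by
  intro l
  induction l with
  | nil => intro m _; rfl
  | cons i t ih =>
    intro m h
    rw [List.foldl_cons, min_eq_left (h i (by simp))]
    exact ih m (fun x hx => h x (by simp [hx]))

theorem pvFold_min_eq (g : Int → Int) : ∀ (l : List Int), ∀ v : Int,
    (∃ i ∈ l, g i = v) → (∀ i ∈ l, v ≤ g i) →
    ∀ m0 : Int, l.foldl (fun m i => min m (g i)) m0 = min m0 v := by
  intro l
  induction l with
  | nil => rintro v ⟨i, hi, _⟩; simp at hi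
  | cons i t ih =>
    rintro v ⟨i0, hi0, hg⟩ hle m0
    rw [List.foldl_cons]
    rcases List.mem_cons.mp hi0 with h | h
    · subst h
      rw [hg, pvFold_min_const g t (min m0 v)
        (fun x hx => le_trans (le_trans (min_le_right _ _) (le_refl v)) (hle x (by simp [hx])))]
    · rw [ih v ⟨i0, h, hg⟩ (fun x hx => hle x (by simp [hx])), min_assoc,
        min_eq_right (hle i (by simp))]

theorem pvPos_getD (s2 : List Char) (c : Char) :
    ((PySem.List.enumerate s2).foldl
        (fun d pc => d.modify pc.2 [] (fun l => l ++ [pc.1])) PySem.Dict.empty).getD c []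
      = ((List.range s2.length).filter (fun k => s2.getD k default == c)).map
          (fun (k : Nat) => ((k : Int))) := by
  rw [pvEnum s2 0, List.foldl_map]
  have h1 : (List.range s2.length).foldl
      (fun d (k : Nat) => d.modify (s2.getD k default) [] (fun l => l ++ [((k : Int) + 0)]))
      PySem.Dict.empty
      = ((List.range s2.length).map (fun (k : Nat) => (s2.getD k default, (k : Int) + 0))).foldl
          (fun d p => d.modify p.1 [] (fun l => l ++ [p.2])) PySem.Dict.empty := by
    rw [List.foldl_map]
  rw [h1, PySem.Dict.getD_foldl_modify_append, PySem.Dict.getD_empty, List.filter_map, List.map_map]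
  simp only [Function.comp_def, add_zero]
  simp

theorem pvAlt_eq (seq1 seq2 : String) (min_hd : Option Int) :
    hamming_sliding_distance_alt seq1 seq2 min_hd
      = (PySem.List.pyRange 0 (((seq2.toList ++ seq2.toList).length : Int) - (seq1.toList.length : Int) + 1) 1).foldl
          (fun m i => min m (pvFull seq1.toList (seq2.toList ++ seq2.toList) i))
          (match min_hd with | none => (seq1.toList.length : Int) | some v => v) := by
  simp only [hamming_sliding_distance_alt]
  by_cases hoffs : ((seq2.toList ++ seq2.toList).length : Int) - (seq1.toList.length : Int) + 1 ≤ 0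
  · rw [if_pos hoffs, PySem.List.pyRange_one_eq_nil hoffs, List.foldl_nil]
  · rw [if_neg hoffs]
    set l1 := seq1.toList with hl1
    set s2 := seq2.toList ++ seq2.toList with hs2
    set n1 : Int := (l1.length : Int) with hn1
    set offs : Int := (s2.length : Int) - n1 + 1 with hoffsdef
    set m0 : Int := (match min_hd with | none => n1 | some v => v) with hm0
    have hoffspos : 0 < offs := by omega
    set pos := (PySem.List.enumerate s2).foldl
      (fun d pc => d.modify pc.2 [] (fun l => l ++ [pc.1])) PySem.Dict.empty with hposdef
    have hpos : ∀ c, pos.getD c []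
        = ((List.range s2.length).filter (fun k => s2.getD k default == c)).map
            (fun (k : Nat) => ((k : Int))) := by
      intro c; rw [hposdef]; exact pvPos_getD s2 c
    set Lfm := (PySem.List.enumerate l1).flatMap
      (fun jc => ((pos.getD jc.2 []).filter
          (fun p => decide (0 ≤ p - jc.1 ∧ p - jc.1 < offs))).map (fun p => p - jc.1)) with hLfm
    have hUpd : ∀ (ms : List Int) (i : Int),
        PySem.List.pySetD ms i (PySem.List.pyGetD ms i 0 + 1) = pvUpd ms i := fun _ _ => rfl
    have hmvec : (PySem.List.enumerate l1).foldl
        (fun ms jc => (pos.getD jc.2 []).foldl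
          (fun ms p => if 0 ≤ p - jc.1 ∧ p - jc.1 < offs then
              PySem.List.pySetD ms (p - jc.1) (PySem.List.pyGetD ms (p - jc.1) 0 + 1)
            else ms) ms)
        (List.replicate offs.toNat 0)
        = Lfm.foldl pvUpd (List.replicate offs.toNat 0) := by
      rw [hLfm, List.foldl_flatMap]
      apply PySem.List.foldl_congr_mem
      intro acc jc _
      simp only [hUpd]
      rw [PySem.List.foldl_ite_eq_foldl_filter
        (p := fun p => 0 ≤ p - jc.1 ∧ p - jc.1 < offs)
        (f := fun ms p => pvUpd ms (p - jc.1)), ← List.foldl_map]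
    rw [hmvec]
    set mvec := Lfm.foldl pvUpd (List.replicate offs.toNat 0) with hmv
    have hlen : mvec.length = offs.toNat := by
      rw [hmv, pvUpd_fold_length, List.length_replicate]
    have hLpos : ∀ x ∈ Lfm, 0 ≤ x := by
      intro x hx
      rw [hLfm] at hx
      simp only [List.mem_flatMap, List.mem_map, List.mem_filter] at hx
      obtain ⟨jc, _, p, ⟨_, hp⟩, rfl⟩ := hx
      exact (of_decide_eq_true hp).1
    have helem : ∀ k : Int, 0 ≤ k → k < offs →
        PySem.List.pyGetD mvec k 0 = pvMatchRow l1 s2 k := by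
      intro k hk0 hk
      rw [hmv, pvUpd_fold_getD k hk0 Lfm _ hLpos
        (by rw [List.length_replicate]; omega)]
      have hinit : PySem.List.pyGetD (List.replicate offs.toNat (0:Int)) k 0 = 0 := by
        have hkc : k = ((k.toNat : Nat) : Int) := by omega
        rw [hkc, PySem.List.pyGetD_natCast, List.getD_replicate _ (by omega)]
      rw [hinit, zero_add, hLfm, List.count_flatMap, pvEnum l1 0, List.map_map]
      have hrow : pvMatchRow l1 s2 k
          = ((List.range l1.length).map
              (fun (j : Nat) => if (PySem.List.pyGet? s2 (k + (j : Int)) == PySem.List.pyGet? l1 (j : Int)) = true then (1:Int) else 0)).sum := by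
        rw [PySem.List.sum_map_ite_one_zero]; rfl
      rw [hrow]
      have hcast : ∀ (l : List Nat), ((l.sum : Nat) : Int) = (l.map (fun (n : Nat) => (n : Int))).sum := by
        intro l; induction l with
        | nil => rfl
        | cons a l ih => simp [ih]
      rw [hcast, List.map_map]
      apply congrArg List.sum
      apply List.map_congr_left
      intro j hj
      have hjlt : j < l1.length := List.mem_range.mp hj
      simp only [Function.comp_def, add_zero]
      -- per-j count
      have hinj : Function.Injective (fun p : Int => p - (j : Int)) := fun a b h => by
        simpa using congrArg (· + (j : Int)) h
      have hcm := List.count_map_of_injective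
        ((pos.getD (l1.getD j default) []).filter
          (fun p => decide (0 ≤ p - (j : Int) ∧ p - (j : Int) < offs)))
        (fun p : Int => p - (j : Int)) hinj (k + (j : Int))
      have harg : k + (j : Int) - (j : Int) = k := by ring
      rw [harg] at hcm
      rw [hcm]
      rw [List.count_filter (by simp [harg]; omega)]
      rw [hpos]
      have hnd : (((List.range s2.length).filter
          (fun m => s2.getD m default == l1.getD j default)).map (fun (m : Nat) => (m : Int))).Nodup := by
        apply List.Nodup.map (fun a b h => by exact_mod_cast h)
        exact (List.nodup_range).filter _
      rw [List.Nodup.count hnd]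
      -- membership iff the match predicate
      have hl1j : PySem.List.pyGet? l1 (j : Int) = some (l1.getD j default) := by
        rw [PySem.List.pyGet?_natCast, List.getElem?_eq_getElem hjlt,
          List.getD_eq_getElem _ _ hjlt]
      have hmemiff : ((k + (j : Int)) ∈ ((List.range s2.length).filter
            (fun m => s2.getD m default == l1.getD j default)).map (fun (m : Nat) => (m : Int)))
          ↔ (PySem.List.pyGet? s2 (k + (j : Int)) == PySem.List.pyGet? l1 (j : Int)) = true := by
        rw [hl1j]
        constructor
        · intro hmem
          simp only [List.mem_map, List.mem_filter, List.mem_range] at hmem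
          obtain ⟨m, ⟨hm, hc⟩, hcast2⟩ := hmem
          rw [← hcast2, PySem.List.pyGet?_natCast, List.getElem?_eq_getElem hm]
          have : s2.getD m default = s2[m] := List.getD_eq_getElem _ _ hm
          rw [this] at hc
          simpa using hc
        · intro hb
          have hknn : 0 ≤ k + (j : Int) := by omega
          rw [PySem.List.pyGet?_of_nonneg _ hknn] at hb
          have hsome : s2[(k + (j : Int)).toNat]? = some (l1.getD j default) := by
            simpa using hb
          have hlt : (k + (j : Int)).toNat < s2.length := by
            rcases List.getElem?_eq_some_iff.mp hsome with ⟨h, _⟩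
            exact h
          simp only [List.mem_map, List.mem_filter, List.mem_range]
          refine ⟨(k + (j : Int)).toNat, ⟨hlt, ?_⟩, by omega⟩
          rcases List.getElem?_eq_some_iff.mp hsome with ⟨h, heq⟩
          rw [List.getD_eq_getElem _ _ hlt, heq]
          simp
      by_cases hmem : (PySem.List.pyGet? s2 (k + (j : Int)) == PySem.List.pyGet? l1 (j : Int)) = true
      · rw [if_pos (hmemiff.mpr hmem), if_pos hmem]
        rfl
      · rw [if_neg (fun hc => hmem (hmemiff.mp hc)), if_neg hmem]
        rfl
    -- nonempty, extract the max
    have hne : mvec ≠ [] := by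
      intro h
      rw [h] at hlen
      simp at hlen
      omega
    obtain ⟨mx, hmx⟩ : ∃ mx, PySem.List.max? mvec (fun x => x) = some mx := by
      cases h : PySem.List.max? mvec (fun x => x) with
      | none => exact absurd ((PySem.List.max?_eq_none_iff _ _).mp h) hne
      | some m => exact ⟨m, rfl⟩
    rw [hmx]
    rw [pvFold_min_eq (fun i => pvFull l1 s2 i) (PySem.List.pyRange 0 offs 1) (n1 - mx)
      ?_ ?_ m0]
    · rfl
    · -- witness: an index attaining the max
      have hmem := PySem.List.max?_mem hmx
      obtain ⟨knat, hklt, hkeq⟩ := List.mem_iff_getElem.mp hmem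
      have hklt' : (knat : Int) < offs := by
        rw [hlen] at hklt; omega
      refine ⟨(knat : Int), PySem.List.mem_pyRange_one.mpr ⟨by positivity, hklt'⟩, ?_⟩
      have hval : pvMatchRow l1 s2 (knat : Int) = mx := by
        rw [← helem _ (by positivity) hklt', PySem.List.pyGetD_natCast,
          List.getD_eq_getElem _ _ hklt, hkeq]
      show pvFull l1 s2 (knat : Int) = n1 - mx
      rw [pvMism_complement, hval, hn1]
    · intro i hi
      obtain ⟨hi0, hi1⟩ := PySem.List.mem_pyRange_one.mp hi
      have hin : PySem.Raise.InRange mvec.length i := by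
        simp only [PySem.Raise.InRange]
        omega
      have hmm : PySem.List.pyGetD mvec i 0 ∈ mvec := PySem.List.pyGetD_mem mvec 0 hin
      have hle := PySem.List.max?_isMax hmx _ hmm
      show n1 - mx ≤ pvFull l1 s2 i
      rw [pvMism_complement, ← helem i hi0 hi1, ← hn1]
      omega

-- ===== VERDICT (by name: the statement is the Claim_ definition above) =====
theorem hamming_sliding_distance_spec : Claim_equal_hamming_sliding_distance := by
  intro seq1 seq2 min_hd _
  unfold Spec_hamming_sliding_distance hamming_sliding_distance
  rw [pvAlt_eq seq1 seq2 min_hd, pvOuterA_spec]
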